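-- pv_equiv track=rewrite | github.com/Nkburdick/Aptoflow | workflows/car_scout/sources/carmax_nationwide.py | estimate_shipping_fee
-- ===== SOURCE A (Python) =====
-- SHIPPING_TIERS: tuple[tuple[int, int], ...] = (
--     (60, 0),       # same metro — no transfer fee
--     (250, 199),    # regional
--     (1500, 299),   # cross-region
--     (99999, 499),  # cross-country
-- )
--
-- _STATE_DISTANCE_MI: dict[str, int] = {
--     "WA": 0,       "OR": 180,     "ID": 380,     "CA": 700,     "NV": 780,
--     "MT": 450,     "UT": 710,     "AZ": 1200,    "WY": 720,     "NM": 1150,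
--     "CO": 980,     "ND": 1100,    "SD": 1200,    "NE": 1400,    "KS": 1550,
--     "OK": 1700,    "TX": 1900,    "MN": 1450,    "IA": 1600,    "MO": 1700,
--     "AR": 1850,    "LA": 2100,    "WI": 1600,    "IL": 1750,    "MS": 2100,
--     "MI": 1900,    "IN": 1900,    "KY": 2000,    "TN": 2100,    "AL": 2300,
--     "OH": 2000,    "WV": 2200,    "VA": 2400,    "NC": 2500,    "SC": 2500,
--     "GA": 2400,    "FL": 2700,    "PA": 2400,    "NY": 2500,    "VT": 2600,
--     "NH": 2600,    "MA": 2600,    "RI": 2650,    "CT": 2600,    "NJ": 2500,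
--     "DE": 2500,    "MD": 2400,    "DC": 2400,    "ME": 2700,
--     "HI": 2700,    "AK": 2200,
-- }
--
-- def estimate_shipping_fee(listing_state: str | None) -> int | None:
--     """Return the CarMax transfer fee (USD) for a listing's state, or None if unknown.
--
--     Tiered per CarMax policy:
--       - 0-60mi  → $0   (same metro)
--       - 60-250  → $199 (regional)
--       - 250-1500 → $299 (cross-region)
--       - 1500+   → $499 (cross-country)
--     """
--     if not listing_state:
--         return None
--     code = listing_state.strip().upper()
--     miles = _STATE_DISTANCE_MI.get(code)
--     if miles is None:
--         return None
--     for upper_bound, fee in SHIPPING_TIERS: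
--         if miles <= upper_bound:
--             return fee
--     return SHIPPING_TIERS[-1][1]
-- ===== SOURCE B (Python) =====
-- # Fee-band tables precomputed by hand from the distance table + tier rule:
-- # WA is the only same-metro state (<=60mi), OR the only regional one (<=250mi);
-- # the rest fall into the cross-region (<=1500mi) or cross-country bands.
-- _CROSS_REGION = frozenset((
--     "ID", "CA", "NV", "MT", "UT", "AZ", "WY", "NM", "CO", "ND", "SD", "NE", "MN",
-- ))
-- _CROSS_COUNTRY = frozenset((
--     "KS", "OK", "TX", "IA", "MO", "AR", "LA", "WI", "IL", "MS", "MI", "IN",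
--     "KY", "TN", "AL", "OH", "WV", "VA", "NC", "SC", "GA", "FL", "PA", "NY",
--     "VT", "NH", "MA", "RI", "CT", "NJ", "DE", "MD", "DC", "ME", "HI", "AK",
-- ))
--
-- def estimate_shipping_fee(listing_state: str | None) -> int | None:
--     if not listing_state:
--         return None
--     code = listing_state.strip().upper()
--     if code == "WA":
--         return 0
--     if code == "OR":
--         return 199
--     if code in _CROSS_REGION:
--         return 299
--     if code in _CROSS_COUNTRY:
--         return 499
--     return None
-- ===== Notes on version B (the rewrite author's own statement) =====
-- stated objective: simpler
-- what changed: B drops the distance table and the per-call tier scan entirely: the fee bands are precomputed by hand into two state-code sets (plus the two singleton bands WA/OR), so the function is a short chain of membership tests.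
import Mathlib
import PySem

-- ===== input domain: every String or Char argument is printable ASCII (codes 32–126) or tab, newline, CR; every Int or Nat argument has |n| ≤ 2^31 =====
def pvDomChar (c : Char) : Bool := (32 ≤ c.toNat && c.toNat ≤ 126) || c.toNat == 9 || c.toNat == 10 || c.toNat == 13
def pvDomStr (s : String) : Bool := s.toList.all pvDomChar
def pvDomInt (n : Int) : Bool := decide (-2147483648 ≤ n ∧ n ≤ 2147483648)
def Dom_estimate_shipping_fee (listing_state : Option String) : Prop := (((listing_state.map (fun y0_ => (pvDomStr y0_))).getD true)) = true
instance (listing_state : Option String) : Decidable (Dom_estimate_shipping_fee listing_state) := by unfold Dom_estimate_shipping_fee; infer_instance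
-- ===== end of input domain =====

set_option maxRecDepth 8000


-- B replaces A's distance dict + per-call tier scan with hand-precomputed fee-band sets, so the function is a short if-chain of membership tests (simpler).

-- ===== PORT A =====
def SHIPPING_TIERS : List (Int × Int) := [(60, 0), (250, 199), (1500, 299), (99999, 499)]

def STATE_DISTANCE_MI : PySem.Dict String Int := PySem.Dict.ofList
  [("WA", 0), ("OR", 180), ("ID", 380), ("CA", 700), ("NV", 780),
   ("MT", 450), ("UT", 710), ("AZ", 1200), ("WY", 720), ("NM", 1150),
   ("CO", 980), ("ND", 1100), ("SD", 1200), ("NE", 1400), ("KS", 1550),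
   ("OK", 1700), ("TX", 1900), ("MN", 1450), ("IA", 1600), ("MO", 1700),
   ("AR", 1850), ("LA", 2100), ("WI", 1600), ("IL", 1750), ("MS", 2100),
   ("MI", 1900), ("IN", 1900), ("KY", 2000), ("TN", 2100), ("AL", 2300),
   ("OH", 2000), ("WV", 2200), ("VA", 2400), ("NC", 2500), ("SC", 2500),
   ("GA", 2400), ("FL", 2700), ("PA", 2400), ("NY", 2500), ("VT", 2600),
   ("NH", 2600), ("MA", 2600), ("RI", 2650), ("CT", 2600), ("NJ", 2500),
   ("DE", 2500), ("MD", 2400), ("DC", 2400), ("ME", 2700),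
   ("HI", 2700), ("AK", 2200)]

-- A's `for upper_bound, fee in SHIPPING_TIERS: if miles <= upper_bound: return fee`
def feeLoopA (miles : Int) : List (Int × Int) → Option Int
  | [] => none
  | (ub, fee) :: rest => if miles ≤ ub then some fee else feeLoopA miles rest

def estimate_shipping_fee (listing_state : Option String) : Option Int :=
  match listing_state with
  | none => none
  | some s =>
    if s = "" then none
    else
      let code := PySem.Str.upper (PySem.Str.strip s)
      match STATE_DISTANCE_MI.get? code with
      | none => none
      | some miles =>
        match feeLoopA miles SHIPPING_TIERS with
        | some fee => some fee
        | none => (PySem.List.pyGet? SHIPPING_TIERS (-1)).map Prod.snd  -- SHIPPING_TIERS[-1][1]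

-- ===== PORT B =====
def CROSS_REGION : PySem.Set String := PySem.Set.ofList
  ["ID", "CA", "NV", "MT", "UT", "AZ", "WY", "NM", "CO", "ND", "SD", "NE", "MN"]

def CROSS_COUNTRY : PySem.Set String := PySem.Set.ofList
  ["KS", "OK", "TX", "IA", "MO", "AR", "LA", "WI", "IL", "MS", "MI", "IN",
   "KY", "TN", "AL", "OH", "WV", "VA", "NC", "SC", "GA", "FL", "PA", "NY",
   "VT", "NH", "MA", "RI", "CT", "NJ", "DE", "MD", "DC", "ME", "HI", "AK"]

def estimate_shipping_fee_alt (listing_state : Option String) : Option Int :=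
  match listing_state with
  | none => none
  | some s =>
    if s = "" then none
    else
      let code := PySem.Str.upper (PySem.Str.strip s)
      if code = "WA" then some 0
      else if code = "OR" then some 199
      else if CROSS_REGION.contains code then some 299
      else if CROSS_COUNTRY.contains code then some 499
      else none

-- ===== PRECONDITION & SPEC =====
def Spec_estimate_shipping_fee (listing_state : Option String) (out : Option Int) : Prop := out = estimate_shipping_fee_alt listing_state
instance (listing_state : Option String) (out : Option Int) : Decidable (Spec_estimate_shipping_fee listing_state out) := by unfold Spec_estimate_shipping_fee; infer_instance

-- ===== CLAIM =====
def Claim_equal_estimate_shipping_fee : Prop := ∀ (listing_state : Option String), Dom_estimate_shipping_fee listing_state → Spec_estimate_shipping_fee listing_state (estimate_shipping_fee listing_state)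

-- ===== LEMMAS AND PROOFS =====

theorem cr_lit : CROSS_REGION = ["ID", "CA", "NV", "MT", "UT", "AZ", "WY", "NM", "CO", "ND", "SD", "NE", "MN"] := by decide

theorem cc_lit : CROSS_COUNTRY = ["KS", "OK", "TX", "IA", "MO", "AR", "LA", "WI", "IL", "MS", "MI", "IN",
   "KY", "TN", "AL", "OH", "WV", "VA", "NC", "SC", "GA", "FL", "PA", "NY",
   "VT", "NH", "MA", "RI", "CT", "NJ", "DE", "MD", "DC", "ME", "HI", "AK"] := by decide

-- the two post-strip cores agree on every code string
theorem core_eq (c : String) :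
    (match STATE_DISTANCE_MI.get? c with
      | none => none
      | some miles =>
        match feeLoopA miles SHIPPING_TIERS with
        | some fee => some fee
        | none => (PySem.List.pyGet? SHIPPING_TIERS (-1)).map Prod.snd)
    = (if c = "WA" then some 0
       else if c = "OR" then some 199
       else if CROSS_REGION.contains c then some 299
       else if CROSS_COUNTRY.contains c then some 499
       else none) := by
  by_cases h1 : c = "WA"
  · subst h1; decide
  by_cases h2 : c = "OR"
  · subst h2; decide
  by_cases h3 : CROSS_REGION.contains c = true
  · rw [cr_lit] at h3
    simp only [PySem.Set.contains_iff, List.mem_cons, List.not_mem_nil, or_false] at h3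
    rcases h3 with rfl|rfl|rfl|rfl|rfl|rfl|rfl|rfl|rfl|rfl|rfl|rfl|rfl
    all_goals decide
  by_cases h4 : CROSS_COUNTRY.contains c = true
  · rw [cc_lit] at h4
    simp only [PySem.Set.contains_iff, List.mem_cons, List.not_mem_nil, or_false] at h4
    rcases h4 with rfl|rfl|rfl|rfl|rfl|rfl|rfl|rfl|rfl|rfl|rfl|rfl|rfl|rfl|rfl|rfl|rfl|rfl|rfl|rfl|rfl|rfl|rfl|rfl|rfl|rfl|rfl|rfl|rfl|rfl|rfl|rfl|rfl|rfl|rfl|rfl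
    all_goals decide
  · -- c is none of the 51 state codes: the dict lookup misses and B's chain falls through
    have h3' := h3; have h4' := h4
    rw [cr_lit] at h3'; rw [cc_lit] at h4'
    simp only [PySem.Set.contains_iff, List.mem_cons, List.not_mem_nil, or_false, not_or] at h3' h4'
    have hnone : STATE_DISTANCE_MI.get? c = none := by
      have hd : STATE_DISTANCE_MI = PySem.Dict.mk
        [("WA", 0), ("OR", 180), ("ID", 380), ("CA", 700), ("NV", 780),
         ("MT", 450), ("UT", 710), ("AZ", 1200), ("WY", 720), ("NM", 1150),
         ("CO", 980), ("ND", 1100), ("SD", 1200), ("NE", 1400), ("KS", 1550),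
         ("OK", 1700), ("TX", 1900), ("MN", 1450), ("IA", 1600), ("MO", 1700),
         ("AR", 1850), ("LA", 2100), ("WI", 1600), ("IL", 1750), ("MS", 2100),
         ("MI", 1900), ("IN", 1900), ("KY", 2000), ("TN", 2100), ("AL", 2300),
         ("OH", 2000), ("WV", 2200), ("VA", 2400), ("NC", 2500), ("SC", 2500),
         ("GA", 2400), ("FL", 2700), ("PA", 2400), ("NY", 2500), ("VT", 2600),
         ("NH", 2600), ("MA", 2600), ("RI", 2650), ("CT", 2600), ("NJ", 2500),
         ("DE", 2500), ("MD", 2400), ("DC", 2400), ("ME", 2700),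
         ("HI", 2700), ("AK", 2200)] := by decide
      rw [hd]
      simp only [PySem.Dict.get?_mk_cons, beq_iff_eq]
      obtain ⟨c3a, c3b, c3c, c3d, c3e, c3f, c3g, c3h, c3i, c3j, c3k, c3l, c3m⟩ := h3'
      obtain ⟨d1,d2,d3,d4,d5,d6,d7,d8,d9,d10,d11,d12,d13,d14,d15,d16,d17,d18,d19,d20,d21,d22,d23,d24,d25,d26,d27,d28,d29,d30,d31,d32,d33,d34,d35,d36⟩ := h4'
      simp [Ne.symm h1, Ne.symm h2, Ne.symm c3a, Ne.symm c3b, Ne.symm c3c, Ne.symm c3d, Ne.symm c3e,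
        Ne.symm c3f, Ne.symm c3g, Ne.symm c3h, Ne.symm c3i, Ne.symm c3j, Ne.symm c3k, Ne.symm c3l, Ne.symm c3m,
        Ne.symm d1, Ne.symm d2, Ne.symm d3, Ne.symm d4, Ne.symm d5, Ne.symm d6, Ne.symm d7, Ne.symm d8,
        Ne.symm d9, Ne.symm d10, Ne.symm d11, Ne.symm d12, Ne.symm d13, Ne.symm d14, Ne.symm d15, Ne.symm d16,
        Ne.symm d17, Ne.symm d18, Ne.symm d19, Ne.symm d20, Ne.symm d21, Ne.symm d22, Ne.symm d23, Ne.symm d24,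
        Ne.symm d25, Ne.symm d26, Ne.symm d27, Ne.symm d28, Ne.symm d29, Ne.symm d30, Ne.symm d31, Ne.symm d32,
        Ne.symm d33, Ne.symm d34, Ne.symm d35, Ne.symm d36]
      rfl
    rw [hnone]
    have hm3 : ¬ c ∈ CROSS_REGION := by rw [← PySem.Set.contains_iff]; exact h3
    have hm4 : ¬ c ∈ CROSS_COUNTRY := by rw [← PySem.Set.contains_iff]; exact h4
    simp [h1, h2, hm3, hm4]

-- ===== VERDICT =====
theorem estimate_shipping_fee_spec : Claim_equal_estimate_shipping_fee := by
  intro ls _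
  unfold Spec_estimate_shipping_fee estimate_shipping_fee estimate_shipping_fee_alt
  cases ls with
  | none => rfl
  | some s =>
    by_cases hs : s = ""
    · simp [hs]
    · simp only [if_neg hs]
      exact core_eq (PySem.Str.upper (PySem.Str.strip s))
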